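-- pv_equiv track=rewrite | github.com/pioneer1541/Family-Archive | backend/app/services/source_tags.py | is_leaf_category_path
-- ===== SOURCE A (Python) =====
-- DEFAULT_CATEGORY_PATH = "archive/misc"
--
-- _CATEGORY_LABELS: dict[str, tuple[str, str]] = {
--     "home": ("Home", "家庭"),
--     "home/manuals": ("Home Manuals", "家庭说明书"),
--     "home/appliances": ("Appliances", "家电资料"),
--     "home/property": ("Home Property", "家庭房产"),
--     "home/maintenance": ("Home Maintenance", "家庭维护"),
--     "home/insurance": ("Home Insurance", "家庭保险"),
--     "home/insurance/vehicle": ("Vehicle Insurance", "车辆保险"),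
--     "home/insurance/property": ("Property Insurance", "房屋财产保险"),
--     "home/insurance/pet": ("Pet Insurance", "宠物保险"),
--     "home/insurance/other": ("Other Home Insurance", "家庭保险其他"),
--     "home/pets": ("Pets", "宠物资料"),
--     "finance": ("Finance", "财务"),
--     "finance/bills": ("Bills", "账单"),
--     "finance/bills/electricity": ("Electricity Bills", "电费账单"),
--     "finance/bills/water": ("Water Bills", "水费账单"),
--     "finance/bills/gas": ("Gas Bills", "燃气账单"),
--     "finance/bills/internet": ("Internet Bills", "网络账单"),
--     "finance/bills/other": ("Other Bills", "其他账单"),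
--     "finance/banking": ("Banking", "银行资料"),
--     "finance/tax": ("Tax", "税务资料"),
--     "finance/investment": ("Investment", "投资资料"),
--     "finance/receipts": ("Receipts", "收据报销"),
--     "legal": ("Legal", "法律"),
--     "legal/contracts": ("Contracts", "合同文件"),
--     "legal/visa": ("Visa", "签证资料"),
--     "legal/property": ("Legal Property", "房产法务"),
--     "legal/insurance": ("Legal Insurance", "保险法务"),
--     "legal/insurance/terms": ("Insurance Terms", "保单条款"),
--     "legal/insurance/claim_dispute": ("Insurance Claim Dispute", "理赔争议"),
--     "legal/identity": ("Identity", "身份资料"),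
--     "health": ("Health", "健康"),
--     "health/medical_records": ("Medical Records", "病历资料"),
--     "health/prescriptions": ("Prescriptions", "处方资料"),
--     "health/reports": ("Health Reports", "健康报告"),
--     "health/insurance": ("Health Insurance", "医保资料"),
--     "health/insurance/private": ("Private Health Insurance", "私保资料"),
--     "health/insurance/other": ("Other Health Insurance", "健康保险其他"),
--     "work": ("Work", "工作"),
--     "work/meeting_notes": ("Meeting Notes", "会议纪要"),
--     "work/research": ("Research", "研究资料"),
--     "work/projects": ("Projects", "项目资料"),
--     "work/certifications": ("Certifications", "资质证书"),
--     "tech": ("Tech", "技术"),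
--     "tech/documentation": ("Technical Documentation", "技术文档"),
--     "tech/network": ("Network", "网络运维"),
--     "tech/home_assistant": ("Home Assistant", "家庭自动化"),
--     "tech/ai": ("AI", "人工智能"),
--     "tech/devops": ("DevOps", "开发运维"),
--     "tech/hardware": ("Hardware", "硬件资料"),
--     "education": ("Education", "学习"),
--     "education/courses": ("Courses", "课程资料"),
--     "education/books": ("Books", "书籍资料"),
--     "education/reference": ("Reference", "参考资料"),
--     "education/tutorials": ("Tutorials", "教程资料"),
--     "media": ("Media", "媒体"),
--     "media/photos": ("Photos", "照片资料"),
--     "media/videos": ("Videos", "视频资料"),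
--     "media/design": ("Design", "设计资料"),
--     "media/creative": ("Creative", "创作资料"),
--     "personal": ("Personal", "个人"),
--     "personal/travel": ("Travel", "旅行资料"),
--     "personal/plans": ("Plans", "计划资料"),
--     "personal/notes": ("Notes", "个人笔记"),
--     "personal/correspondence": ("Correspondence", "通信资料"),
--     "archive": ("Archive", "归档"),
--     "archive/old": ("Old Archive", "历史归档"),
--     "archive/misc": ("Archive Misc", "归档杂项"),
-- }
--
-- CANONICAL_CATEGORY_PATHS = tuple(sorted(_CATEGORY_LABELS.keys()))
--
-- def is_leaf_category_path(path: str | None) -> bool: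
--     normalized = normalize_category_path(path)
--     if not normalized:
--         return False
--     prefix = normalized.rstrip("/") + "/"
--     for candidate in CANONICAL_CATEGORY_PATHS:
--         if str(candidate).startswith(prefix):
--             return False
--     return True
--
-- def normalize_category_path(path: str | None) -> str:
--     p = str(path or "").strip().lower()
--     if p in _CATEGORY_LABELS:
--         return p
--     return DEFAULT_CATEGORY_PATH
-- ===== SOURCE B (Python) =====
-- DEFAULT_CATEGORY_PATH = "archive/misc"
--
-- # canonical category paths as a tree: top-level section -> relative segment tuples
-- _CATEGORY_TREE = {
--     "home": (("manuals",), ("appliances",), ("property",), ("maintenance",),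
--              ("insurance",), ("insurance", "vehicle"), ("insurance", "property"),
--              ("insurance", "pet"), ("insurance", "other"), ("pets",)),
--     "finance": (("bills",), ("bills", "electricity"), ("bills", "water"),
--                 ("bills", "gas"), ("bills", "internet"), ("bills", "other"),
--                 ("banking",), ("tax",), ("investment",), ("receipts",)),
--     "legal": (("contracts",), ("visa",), ("property",), ("insurance",),
--               ("insurance", "terms"), ("insurance", "claim_dispute"), ("identity",)),
--     "health": (("medical_records",), ("prescriptions",), ("reports",),
--                ("insurance",), ("insurance", "private"), ("insurance", "other")),
--     "work": (("meeting_notes",), ("research",), ("projects",), ("certifications",)),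
--     "tech": (("documentation",), ("network",), ("home_assistant",), ("ai",),
--              ("devops",), ("hardware",)),
--     "education": (("courses",), ("books",), ("reference",), ("tutorials",)),
--     "media": (("photos",), ("videos",), ("design",), ("creative",)),
--     "personal": (("travel",), ("plans",), ("notes",), ("correspondence",)),
--     "archive": (("old",), ("misc",)),
-- }
--
-- # flatten once: the set of canonical paths
-- _CANONICAL_SET = set()
-- for _top, _subs in _CATEGORY_TREE.items():
--     _CANONICAL_SET.add(_top)
--     for _seg in _subs:
--         _CANONICAL_SET.add("/".join((_top,) + _seg))
--
-- # the set of immediate-parent (interior) paths: a canonical path is a leaf iff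
-- # it is nobody's parent
-- _PARENT_SET = set()
-- for _top, _subs in _CATEGORY_TREE.items():
--     for _seg in _subs:
--         _PARENT_SET.add("/".join(((_top,) + _seg)[:-1]))
--
--
-- def is_leaf_category_path(path):
--     p = str(path or "").strip().lower()
--     normalized = p if p in _CANONICAL_SET else DEFAULT_CATEGORY_PATH
--     return bool(normalized) and normalized not in _PARENT_SET
-- ===== Notes on version B (the rewrite author's own statement) =====
-- stated objective: alternative
-- what changed: B stores the categories as a tree (top-level section -> segment tuples), flattens it once into a set of canonical paths and a set of immediate-parent (interior) paths, and answers leaf-ness by a single set-membership test on the normalized path, instead of A's per-call startswith scan over all sorted canonical paths.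
import Mathlib
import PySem

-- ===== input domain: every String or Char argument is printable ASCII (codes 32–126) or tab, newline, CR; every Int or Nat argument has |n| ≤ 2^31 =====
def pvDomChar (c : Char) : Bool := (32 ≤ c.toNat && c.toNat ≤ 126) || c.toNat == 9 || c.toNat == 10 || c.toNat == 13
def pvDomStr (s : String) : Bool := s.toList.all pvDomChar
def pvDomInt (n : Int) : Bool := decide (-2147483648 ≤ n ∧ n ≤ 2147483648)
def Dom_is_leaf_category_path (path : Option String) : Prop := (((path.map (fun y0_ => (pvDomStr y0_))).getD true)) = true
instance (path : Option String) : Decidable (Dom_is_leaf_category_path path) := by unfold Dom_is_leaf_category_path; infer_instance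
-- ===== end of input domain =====

-- B flattens a tree-shaped category table into a precomputed set of immediate-parent
-- (interior) paths and answers leaf-ness by one membership test; objective: alternative.

def DEFAULT_CATEGORY_PATH : String := "archive/misc"

-- ===== PORT A =====
-- keys of _CATEGORY_LABELS, in insertion order (values are unused by the function)
def pvCategoryKeys : List String :=
  ["home", "home/manuals", "home/appliances", "home/property", "home/maintenance",
   "home/insurance", "home/insurance/vehicle", "home/insurance/property",
   "home/insurance/pet", "home/insurance/other", "home/pets",
   "finance", "finance/bills", "finance/bills/electricity", "finance/bills/water",
   "finance/bills/gas", "finance/bills/internet", "finance/bills/other",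
   "finance/banking", "finance/tax", "finance/investment", "finance/receipts",
   "legal", "legal/contracts", "legal/visa", "legal/property", "legal/insurance",
   "legal/insurance/terms", "legal/insurance/claim_dispute", "legal/identity",
   "health", "health/medical_records", "health/prescriptions", "health/reports",
   "health/insurance", "health/insurance/private", "health/insurance/other",
   "work", "work/meeting_notes", "work/research", "work/projects", "work/certifications",
   "tech", "tech/documentation", "tech/network", "tech/home_assistant", "tech/ai",
   "tech/devops", "tech/hardware",
   "education", "education/courses", "education/books", "education/reference",
   "education/tutorials",
   "media", "media/photos", "media/videos", "media/design", "media/creative",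
   "personal", "personal/travel", "personal/plans", "personal/notes",
   "personal/correspondence",
   "archive", "archive/old", "archive/misc"]

def CANONICAL_CATEGORY_PATHS : List String :=
  PySem.List.sorted pvCategoryKeys (fun s => s) false

-- normalize_category_path as A's module writes it (dict-key membership test)
def normalize_category_path (path : Option String) : String :=
  let p := PySem.Str.lower (PySem.Str.strip (path.getD ""))
  if pvCategoryKeys.contains p then p else DEFAULT_CATEGORY_PATH

-- hand port of s.rstrip("/"): drop trailing '/' characters (exact for a one-char strip set)
def pvRstripSlash (s : String) : String :=
  String.ofList ((s.toList.reverse.dropWhile (· == '/')).reverse)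

def is_leaf_category_path (path : Option String) : Bool :=
  let normalized := normalize_category_path path
  if normalized = "" then false
  else
    let pre := pvRstripSlash normalized ++ "/"
    -- 'for candidate in …: if candidate.startswith(pre): return False / return True'
    if CANONICAL_CATEGORY_PATHS.any (fun c => PySem.Str.startswith c pre) then false
    else true

-- ===== PORT B =====
-- the canonical paths as a tree: top-level section -> relative segment tuples
def pvCategoryTree : List (String × List (List String)) :=
  [("home", [["manuals"], ["appliances"], ["property"], ["maintenance"],
             ["insurance"], ["insurance", "vehicle"], ["insurance", "property"],
             ["insurance", "pet"], ["insurance", "other"], ["pets"]]),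
   ("finance", [["bills"], ["bills", "electricity"], ["bills", "water"],
                ["bills", "gas"], ["bills", "internet"], ["bills", "other"],
                ["banking"], ["tax"], ["investment"], ["receipts"]]),
   ("legal", [["contracts"], ["visa"], ["property"], ["insurance"],
              ["insurance", "terms"], ["insurance", "claim_dispute"], ["identity"]]),
   ("health", [["medical_records"], ["prescriptions"], ["reports"],
               ["insurance"], ["insurance", "private"], ["insurance", "other"]]),
   ("work", [["meeting_notes"], ["research"], ["projects"], ["certifications"]]),
   ("tech", [["documentation"], ["network"], ["home_assistant"], ["ai"],
             ["devops"], ["hardware"]]),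
   ("education", [["courses"], ["books"], ["reference"], ["tutorials"]]),
   ("media", [["photos"], ["videos"], ["design"], ["creative"]]),
   ("personal", [["travel"], ["plans"], ["notes"], ["correspondence"]]),
   ("archive", [["old"], ["misc"]])]

-- first flattening loop of Source B: the set of canonical paths
def pvCanonicalSet : PySem.Set String :=
  pvCategoryTree.foldl (fun s tp =>
    tp.2.foldl (fun s2 seg => PySem.Set.add s2 (PySem.Str.join "/" (tp.1 :: seg)))
      (PySem.Set.add s tp.1)) PySem.Set.empty

-- second flattening loop of Source B: the set of immediate-parent (interior) paths;
-- '((top,) + seg)[:-1]' is ported as PySem.List.slice … none (some (-1))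
def pvParentSet : PySem.Set String :=
  pvCategoryTree.foldl (fun s tp =>
    tp.2.foldl (fun s2 seg =>
      PySem.Set.add s2 (PySem.Str.join "/" (PySem.List.slice (tp.1 :: seg) none (some (-1)))))
      s) PySem.Set.empty

def is_leaf_category_path_alt (path : Option String) : Bool :=
  let p := PySem.Str.lower (PySem.Str.strip (path.getD ""))
  let normalized := if PySem.Set.contains pvCanonicalSet p then p else DEFAULT_CATEGORY_PATH
  decide (normalized ≠ "") && !(PySem.Set.contains pvParentSet normalized)

-- ===== PRECONDITION & SPEC =====
def Spec_is_leaf_category_path (path : Option String) (out : Bool) : Prop := out = is_leaf_category_path_alt path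
instance (path : Option String) (out : Bool) : Decidable (Spec_is_leaf_category_path path out) := by unfold Spec_is_leaf_category_path; infer_instance

-- ===== CLAIM =====
def Claim_equal_is_leaf_category_path : Prop := ∀ (path : Option String), Dom_is_leaf_category_path path → Spec_is_leaf_category_path path (is_leaf_category_path path)

-- ===== LEMMAS AND PROOFS =====

-- A's tail as a function of the normalized path
def pvTailA (n : String) : Bool :=
  if n = "" then false
  else
    let pre := pvRstripSlash n ++ "/"
    if CANONICAL_CATEGORY_PATHS.any (fun c => PySem.Str.startswith c pre) then false
    else true

-- B's tail as a function of the normalized path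
def pvTailB (n : String) : Bool :=
  decide (n ≠ "") && !(PySem.Set.contains pvParentSet n)

theorem tailA_eq (path : Option String) :
    is_leaf_category_path path = pvTailA (normalize_category_path path) := rfl

-- the flattened canonical set is exactly A's key list, in the same (insertion) order
set_option maxHeartbeats 4000000 in
set_option maxRecDepth 100000 in
theorem canonicalSet_eq : pvCanonicalSet = pvCategoryKeys := by decide

-- the parent set evaluated to a literal
set_option maxHeartbeats 4000000 in
set_option maxRecDepth 100000 in
theorem parentSet_eq : pvParentSet =
    ["home", "home/insurance", "finance", "finance/bills", "legal", "legal/insurance",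
     "health", "health/insurance", "work", "tech", "education", "media", "personal",
     "archive"] := by decide

theorem canonSet_contains (p : String) :
    PySem.Set.contains pvCanonicalSet p = pvCategoryKeys.contains p := by
  rw [canonicalSet_eq]; rfl

theorem alt_eq (path : Option String) :
    is_leaf_category_path_alt path = pvTailB (normalize_category_path path) := by
  simp only [is_leaf_category_path_alt, normalize_category_path, pvTailB, canonSet_contains]
  rfl

-- CANONICAL_CATEGORY_PATHS named as a literal (sorted order of the keys)
def pvCanonLit : List String :=
  ["archive", "archive/misc", "archive/old",
   "education", "education/books", "education/courses", "education/reference", "education/tutorials",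
   "finance", "finance/banking", "finance/bills", "finance/bills/electricity", "finance/bills/gas",
   "finance/bills/internet", "finance/bills/other", "finance/bills/water", "finance/investment",
   "finance/receipts", "finance/tax",
   "health", "health/insurance", "health/insurance/other", "health/insurance/private",
   "health/medical_records", "health/prescriptions", "health/reports",
   "home", "home/appliances", "home/insurance", "home/insurance/other", "home/insurance/pet",
   "home/insurance/property", "home/insurance/vehicle", "home/maintenance", "home/manuals",
   "home/pets", "home/property",
   "legal", "legal/contracts", "legal/identity", "legal/insurance",
   "legal/insurance/claim_dispute", "legal/insurance/terms", "legal/property", "legal/visa",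
   "media", "media/creative", "media/design", "media/photos", "media/videos",
   "personal", "personal/correspondence", "personal/notes", "personal/plans", "personal/travel",
   "tech", "tech/ai", "tech/devops", "tech/documentation", "tech/hardware",
   "tech/home_assistant", "tech/network",
   "work", "work/certifications", "work/meeting_notes", "work/projects", "work/research"]

set_option maxHeartbeats 4000000 in
set_option maxRecDepth 100000 in
theorem canon_eq : CANONICAL_CATEGORY_PATHS = pvCanonLit := by
  apply PySem.List.sorted_eq_of_perm_of_pairwise_lt
  · decide
  · simp only [String.lt_iff_toList_lt]
    decide

theorem norm_mem (path : Option String) :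
    normalize_category_path path ∈ pvCategoryKeys := by
  have he : normalize_category_path path =
      (if pvCategoryKeys.contains (PySem.Str.lower (PySem.Str.strip (path.getD ""))) = true
       then PySem.Str.lower (PySem.Str.strip (path.getD "")) else DEFAULT_CATEGORY_PATH) := rfl
  rw [he]
  split_ifs with h
  · simpa using h
  · decide

set_option maxHeartbeats 4000000 in
set_option maxRecDepth 100000 in
theorem tails_agree : pvCategoryKeys.all (fun n => pvTailA n == pvTailB n) = true := by
  simp only [pvTailA, pvTailB, canon_eq, parentSet_eq]
  decide

theorem is_leaf_category_path_spec : Claim_equal_is_leaf_category_path := by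
  intro path _
  unfold Spec_is_leaf_category_path
  rw [tailA_eq, alt_eq]
  have h := List.all_eq_true.mp tails_agree _ (norm_mem path)
  exact eq_of_beq h
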